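-- pv_equiv track=rewrite | github.com/austral-prog/tp-10-Sgilardone | maps_loops.py | reverse_dict
-- ===== SOURCE A (Python) =====
-- def reverse_dict(dicc):
--     a={}
--     for k, v in dicc.items():
--
--         if v in a:
--             a[v]+=k
--         else:
--             a[v]=k
--     return a
-- ===== SOURCE B (Python) =====
-- def _concat(ks):
--     # reduce-style collapse with no initializer: first key seeds the accumulation
--     acc = ks[0]
--     for k in ks[1:]:
--         acc += k
--     return acc
--
--
-- def reverse_dict(dicc):
--     groups = {}
--     for k, v in dicc.items():
--         groups.setdefault(v, []).append(k)
--     return {v: _concat(ks) for v, ks in groups.items()}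
-- ===== Notes on version B (the rewrite author's own statement) =====
-- stated objective: alternative
-- what changed: Replaces A's single running string-accumulation pass with an index-then-reduce structure: first build a value->list-of-keys grouping dict, then collapse each group with a no-initializer reduce.
import Mathlib
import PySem

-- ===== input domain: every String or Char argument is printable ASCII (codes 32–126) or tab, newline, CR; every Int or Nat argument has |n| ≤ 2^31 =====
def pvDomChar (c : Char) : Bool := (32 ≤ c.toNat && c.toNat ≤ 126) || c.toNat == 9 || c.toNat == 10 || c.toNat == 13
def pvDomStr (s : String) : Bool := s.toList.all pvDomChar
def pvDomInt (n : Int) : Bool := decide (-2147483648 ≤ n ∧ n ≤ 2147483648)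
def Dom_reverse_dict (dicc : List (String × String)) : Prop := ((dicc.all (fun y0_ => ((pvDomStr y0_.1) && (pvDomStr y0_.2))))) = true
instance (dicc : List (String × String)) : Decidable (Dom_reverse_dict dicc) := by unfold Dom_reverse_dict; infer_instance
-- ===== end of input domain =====

-- B replaces A's running string-accumulation with a group-then-reduce pass; same cost, alternative structure.
-- ===== PORT A =====
def reverse_dict (dicc : List (String × String)) : List (String × String) :=
  (dicc.foldl (fun a p =>
      if a.contains p.2 then a.insert p.2 (a.getD p.2 "" ++ p.1)  -- a[v] += k
      else a.insert p.2 p.1)                                      -- a[v] = k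
    PySem.Dict.empty).items

-- ===== PORT B =====
-- _concat: reduce with no initializer; [] is unreachable (group lists are built nonempty)
def pvConcat (ks : List String) : String :=
  match ks with
  | [] => ""
  | h :: t => t.foldl (· ++ ·) h

def reverse_dict_alt (dicc : List (String × String)) : List (String × String) :=
  let groups := dicc.foldl (fun g p => g.modify p.2 [] (· ++ [p.1])) PySem.Dict.empty
  groups.items.map (fun q => (q.1, pvConcat q.2))

-- ===== PRECONDITION & SPEC =====
def Spec_reverse_dict (dicc : List (String × String)) (out : List (String × String)) : Prop := out = reverse_dict_alt dicc
instance (dicc : List (String × String)) (out : List (String × String)) : Decidable (Spec_reverse_dict dicc out) := by unfold Spec_reverse_dict; infer_instance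

-- ===== CLAIM (what is proved, stated in full; the proofs are below) =====
def Claim_equal_reverse_dict : Prop := ∀ (dicc : List (String × String)), Dom_reverse_dict dicc → Spec_reverse_dict dicc (reverse_dict dicc)

-- ===== LEMMAS AND PROOFS =====

def pvF : String × List String → String × String := fun q => (q.1, pvConcat q.2)

theorem pvConcat_append (ks : List String) (k : String) :
    pvConcat (ks ++ [k]) = pvConcat ks ++ k := by
  cases ks with
  | nil => simp [pvConcat]
  | cons h t => simp [pvConcat, List.foldl_append]

theorem rel_step (a : PySem.Dict String String) (g : PySem.Dict String (List String))
    (h : a.items = g.items.map pvF) (p : String × String) :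
    (if a.contains p.2 then a.insert p.2 (a.getD p.2 "" ++ p.1) else a.insert p.2 p.1).items
      = (g.modify p.2 [] (· ++ [p.1])).items.map pvF := by
  obtain ⟨k, v⟩ := p
  have hc : a.contains v = g.contains v := by
    simp only [PySem.Dict.contains, h, List.any_map]
    rfl
  have hget : a.get? v = (g.get? v).map pvConcat := by
    have hcomp : ((fun p : String × String => p.1 == v) ∘ pvF)
        = fun q : String × List String => q.1 == v := by funext q; rfl
    simp only [PySem.Dict.get?, h, List.find?_map, hcomp]
    cases List.find? (fun q : String × List String => q.1 == v) g.items <;> rfl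
  simp only [PySem.Dict.modify, PySem.Dict.insert, hc]
  by_cases hcv : g.contains v = true
  · simp only [hcv, if_true, h, List.map_map]
    have hks : ∃ ks, g.get? v = some ks := by
      cases hge : g.get? v with
      | some ks => exact ⟨ks, rfl⟩
      | none =>
        exfalso
        rw [PySem.Dict.contains, List.any_eq_true] at hcv
        obtain ⟨q, hm, hq⟩ := hcv
        simp only [PySem.Dict.get?, Option.map_eq_none_iff, List.find?_eq_none] at hge
        exact absurd hq (by simpa using hge q hm)
      
    obtain ⟨ks, hks⟩ := hks
    have hgetD : a.getD v "" = pvConcat ks := by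
      simp [PySem.Dict.getD, hget, hks]
    have hgetDg : g.getD v [] = ks := by simp [PySem.Dict.getD, hks]
    congr 1
    funext q
    simp only [Function.comp, pvF]
    by_cases hq : (q.1 == v) = true
    · simp [hq, hgetD, hgetDg, pvConcat_append]
    · simp [hq]
  · have hcv' : g.contains v = false := eq_false_of_ne_true hcv
    have hgD : g.getD v [] = [] := by
      simp only [PySem.Dict.getD, PySem.Dict.get?]
      rw [PySem.Dict.contains] at hcv'
      have hall := List.any_eq_false.mp hcv'
      have : List.find? (fun p : String × List String => p.1 == v) g.items = none := by
        rw [List.find?_eq_none]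
        intro x hx
        exact hall x hx
      simp [this]
    simp [hcv', h, hgD, pvF, pvConcat]

theorem rel_fold (l : List (String × String))
    (a : PySem.Dict String String) (g : PySem.Dict String (List String))
    (h : a.items = g.items.map pvF) :
    (l.foldl (fun a p =>
        if a.contains p.2 then a.insert p.2 (a.getD p.2 "" ++ p.1)
        else a.insert p.2 p.1) a).items
      = (l.foldl (fun g p => g.modify p.2 [] (· ++ [p.1])) g).items.map pvF := by
  induction l generalizing a g with
  | nil => simpa using h
  | cons p t ih =>
    simp only [List.foldl_cons]
    exact ih _ _ (by
      have := rel_step a g h p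
      cases a; cases g
      simpa [PySem.Dict.modify] using this)

-- ===== VERDICT (by name: the statement is the Claim_ definition above) =====
theorem reverse_dict_spec : Claim_equal_reverse_dict := by
  intro dicc _
  unfold Spec_reverse_dict reverse_dict reverse_dict_alt
  simpa using rel_fold dicc ⟨[]⟩ ⟨[]⟩ rfl
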